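-- pv_equiv track=rewrite | github.com/Siguoqing/NurbsVQVAE_code | utils.py | analyze_face_section
-- ===== SOURCE A (Python) =====
-- from typing import List, Tuple, Dict
--
-- def analyze_face_section(face_tokens: List[int], bbox_tokens_per_element: int, se_tokens_per_element: int,
--                         face_index_offset: int, bbox_token_offset: int, se_token_offset: int,
--                         se_codebook_size: int, bbox_index_size: int) -> Tuple[int, int]:
--     """
--     分析面部分的结构正确性
--     面的结构: [bbox_token(6个)] + [se_token(4个)] + [面索引] + ...
--
--     Args:
--         face_tokens: 面部分的token序列
--         bbox_tokens_per_element: 每个元素的bbox token数量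
--         se_tokens_per_element: 每个元素的se token数量
--         face_index_offset: 面索引偏移量
--         bbox_token_offset: bbox token偏移量
--         se_token_offset: se token偏移量
--         se_codebook_size: SE码本大小
--         bbox_index_size: BBox索引大小
--
--     Returns:
--         (正确位置数, 总位置数)
--     """
--     if len(face_tokens) == 0:
--         return 0, 0
--
--     correct_positions = 0
--     total_positions = len(face_tokens)
--
--     # 每个面的结构长度
--     face_structure_len = bbox_tokens_per_element + se_tokens_per_element + 1  # +1 for face index
--
--     face_index_expected = face_index_offset  # 面索引应该从face_index_offset开始递增
--
--     i = 0
--     while i < len(face_tokens):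
--         if i + face_structure_len > len(face_tokens):
--             # 剩余token不足一个完整面结构
--             break
--
--         # 检查bbox tokens (前6个位置)
--         for j in range(bbox_tokens_per_element):
--             token = face_tokens[i + j]
--             if bbox_token_offset <= token < bbox_token_offset + bbox_index_size:
--                 correct_positions += 1
--
--         # 检查se tokens (第7-10个位置)
--         for j in range(se_tokens_per_element):
--             pos = i + bbox_tokens_per_element + j
--             token = face_tokens[pos]
--             if se_token_offset <= token < se_token_offset + se_codebook_size:
--                 correct_positions += 1
--
--         # 检查面索引 (第9个位置)
--         face_idx_pos = i + bbox_tokens_per_element + se_tokens_per_element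
--         if face_idx_pos < len(face_tokens):
--             token = face_tokens[face_idx_pos]
--             # 面索引必须等于期望值 (升序排布)
--             if token == face_index_expected:
--                 correct_positions += 1
--             face_index_expected += 1
--
--         i += face_structure_len
--
--     return correct_positions, total_positions
-- ===== SOURCE B (Python) =====
-- def analyze_face_section(face_tokens, bbox_tokens_per_element, se_tokens_per_element,
--                          face_index_offset, bbox_token_offset, se_token_offset,
--                          se_codebook_size, bbox_index_size):
--     face_structure_len = bbox_tokens_per_element + se_tokens_per_element + 1
--     num_blocks = len(face_tokens) // face_structure_len
--     correct_positions = 0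
--     for p in range(num_blocks * face_structure_len):
--         block, r = divmod(p, face_structure_len)
--         token = face_tokens[p]
--         if r < bbox_tokens_per_element:
--             if bbox_token_offset <= token < bbox_token_offset + bbox_index_size:
--                 correct_positions += 1
--         elif r < bbox_tokens_per_element + se_tokens_per_element:
--             if se_token_offset <= token < se_token_offset + se_codebook_size:
--                 correct_positions += 1
--         else:
--             if token == face_index_offset + block:
--                 correct_positions += 1
--     return correct_positions, len(face_tokens)
-- ===== Notes on version B (the rewrite author's own statement) =====
-- stated objective: alternative
-- what changed: Replaces A's while-loop over block starts with two inner for-loops and an incrementing expected-index counter by one flat loop over all positions of the complete blocks, classifying each position by divmod(p, face_structure_len) and deriving the expected face index as face_index_offset + p // face_structure_len.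
-- outside the precondition, e.g. on analyze_face_section([3], -1, 1, 3, 0, 0, 10, 10): A returns (2, 1), B returns (1, 1)
import Mathlib
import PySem

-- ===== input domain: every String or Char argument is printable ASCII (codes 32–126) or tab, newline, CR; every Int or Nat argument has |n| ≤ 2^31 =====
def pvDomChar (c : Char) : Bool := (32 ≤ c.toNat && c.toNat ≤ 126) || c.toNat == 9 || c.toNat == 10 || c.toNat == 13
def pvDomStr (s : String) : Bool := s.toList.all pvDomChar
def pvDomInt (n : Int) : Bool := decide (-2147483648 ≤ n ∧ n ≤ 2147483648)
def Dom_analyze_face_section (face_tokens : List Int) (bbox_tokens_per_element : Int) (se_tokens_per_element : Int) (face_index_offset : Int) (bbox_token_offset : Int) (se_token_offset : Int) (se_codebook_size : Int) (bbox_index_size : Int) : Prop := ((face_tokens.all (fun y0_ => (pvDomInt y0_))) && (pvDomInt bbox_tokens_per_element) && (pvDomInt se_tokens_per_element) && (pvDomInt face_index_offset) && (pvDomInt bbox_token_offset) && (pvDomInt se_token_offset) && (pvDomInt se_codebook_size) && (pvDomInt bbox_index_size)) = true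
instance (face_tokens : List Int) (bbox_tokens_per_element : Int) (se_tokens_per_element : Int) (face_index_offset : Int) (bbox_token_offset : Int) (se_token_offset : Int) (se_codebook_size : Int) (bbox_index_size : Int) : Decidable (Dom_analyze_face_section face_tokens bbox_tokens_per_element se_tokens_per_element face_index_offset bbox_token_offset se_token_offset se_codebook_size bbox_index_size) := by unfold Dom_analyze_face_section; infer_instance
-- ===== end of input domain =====

-- B replaces A's while-loop over block starts (with two inner for-loops and an incrementing
-- expected-face-index counter) by ONE flat loop over all positions of the complete blocks,
-- classifying each position by divmod(p, face_structure_len); objective: alternative (same cost).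

-- ===== PORT A =====
-- 'for j in range(bbox_tokens_per_element): token = face_tokens[i+j]; if …: correct += 1'
-- (index access via pyGetD: under Pre_ every access is in range, so the default is never read)
def afsBbox (xs : List Int) (bto bis i bbox : Int) (acc : Int) : Int :=
  (PySem.List.pyRange 0 bbox 1).foldl (fun acc j =>
    let token := PySem.List.pyGetD xs (i + j) 0
    if bto ≤ token ∧ token < bto + bis then acc + 1 else acc) acc

-- 'for j in range(se_tokens_per_element): pos = i + bbox + j; token = face_tokens[pos]; if …: correct += 1'
def afsSe (xs : List Int) (sto scs i bbox se : Int) (acc : Int) : Int :=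
  (PySem.List.pyRange 0 se 1).foldl (fun acc j =>
    let token := PySem.List.pyGetD xs (i + bbox + j) 0
    if sto ≤ token ∧ token < sto + scs then acc + 1 else acc) acc

-- the 'while i < len(face_tokens)' loop; fuel bounds the iteration count (≤ len+1 under Pre_)
def afsLoop (xs : List Int) (bbox se fio bto sto scs bis fsl : Int) :
    Nat → Int → Int → Int → Int
  | 0, _, _, acc => acc
  | fuel + 1, i, fie, acc =>
    if i < (xs.length : Int) then
      if (xs.length : Int) < i + fsl then acc
      else
        let acc1 := afsBbox xs bto bis i bbox acc
        let acc2 := afsSe xs sto scs i bbox se acc1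
        let fip := i + bbox + se
        if fip < (xs.length : Int) then
          let token := PySem.List.pyGetD xs fip 0
          afsLoop xs bbox se fio bto sto scs bis fsl fuel (i + fsl) (fie + 1)
            (if token = fie then acc2 + 1 else acc2)
        else
          afsLoop xs bbox se fio bto sto scs bis fsl fuel (i + fsl) fie acc2
    else acc

def analyze_face_section (face_tokens : List Int) (bbox_tokens_per_element : Int) (se_tokens_per_element : Int) (face_index_offset : Int) (bbox_token_offset : Int) (se_token_offset : Int) (se_codebook_size : Int) (bbox_index_size : Int) : Int × Int :=
  if face_tokens.length = 0 then (0, 0)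
  else
    let face_structure_len := bbox_tokens_per_element + se_tokens_per_element + 1
    (afsLoop face_tokens bbox_tokens_per_element se_tokens_per_element face_index_offset
      bbox_token_offset se_token_offset se_codebook_size bbox_index_size face_structure_len
      (face_tokens.length + 1) 0 face_index_offset 0,
     (face_tokens.length : Int))

-- ===== PORT B =====
def analyze_face_section_alt (face_tokens : List Int) (bbox_tokens_per_element : Int) (se_tokens_per_element : Int) (face_index_offset : Int) (bbox_token_offset : Int) (se_token_offset : Int) (se_codebook_size : Int) (bbox_index_size : Int) : Int × Int :=
  let fsl := bbox_tokens_per_element + se_tokens_per_element + 1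
  let num_blocks := PySem.Int.floordiv (face_tokens.length : Int) fsl
  let correct := (PySem.List.pyRange 0 (num_blocks * fsl) 1).foldl (fun acc p =>
    let block := PySem.Int.floordiv p fsl
    let r := PySem.Int.mod p fsl
    let token := PySem.List.pyGetD face_tokens p 0
    if r < bbox_tokens_per_element then
      if bbox_token_offset ≤ token ∧ token < bbox_token_offset + bbox_index_size then acc + 1 else acc
    else if r < bbox_tokens_per_element + se_tokens_per_element then
      if se_token_offset ≤ token ∧ token < se_token_offset + se_codebook_size then acc + 1 else acc
    else
      if token = face_index_offset + block then acc + 1 else acc) 0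
  (correct, (face_tokens.length : Int))

-- ===== PRECONDITION & SPEC =====
-- Pre_ restricts the two token-count parameters to the natural domain (nonnegative counts):
-- with a negative count A indexes with negative positions (Python wraparound) or raises
-- IndexError, and with bbox+se+1 ≤ 0 A's while loop never advances (it diverges or raises).
def Pre_analyze_face_section (face_tokens : List Int) (bbox_tokens_per_element : Int) (se_tokens_per_element : Int) (face_index_offset : Int) (bbox_token_offset : Int) (se_token_offset : Int) (se_codebook_size : Int) (bbox_index_size : Int) : Prop :=
  0 ≤ bbox_tokens_per_element ∧ 0 ≤ se_tokens_per_element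
instance (face_tokens : List Int) (bbox_tokens_per_element : Int) (se_tokens_per_element : Int) (face_index_offset : Int) (bbox_token_offset : Int) (se_token_offset : Int) (se_codebook_size : Int) (bbox_index_size : Int) : Decidable (Pre_analyze_face_section face_tokens bbox_tokens_per_element se_tokens_per_element face_index_offset bbox_token_offset se_token_offset se_codebook_size bbox_index_size) := by unfold Pre_analyze_face_section; infer_instance

def pvWitness_analyze_face_section : List Int × Int × Int × Int × Int × Int × Int × Int :=
  ([5, 6, 2, 5, 6, 3], 2, 1, 2, 5, 5, 3, 3)

def Spec_analyze_face_section (face_tokens : List Int) (bbox_tokens_per_element : Int) (se_tokens_per_element : Int) (face_index_offset : Int) (bbox_token_offset : Int) (se_token_offset : Int) (se_codebook_size : Int) (bbox_index_size : Int) (out : Int × Int) : Prop := out = analyze_face_section_alt face_tokens bbox_tokens_per_element se_tokens_per_element face_index_offset bbox_token_offset se_token_offset se_codebook_size bbox_index_size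
instance (face_tokens : List Int) (bbox_tokens_per_element : Int) (se_tokens_per_element : Int) (face_index_offset : Int) (bbox_token_offset : Int) (se_token_offset : Int) (se_codebook_size : Int) (bbox_index_size : Int) (out : Int × Int) : Decidable (Spec_analyze_face_section face_tokens bbox_tokens_per_element se_tokens_per_element face_index_offset bbox_token_offset se_token_offset se_codebook_size bbox_index_size out) := by unfold Spec_analyze_face_section; infer_instance

-- ===== CLAIM (what is proved, stated in full; the proofs are below) =====
def Claim_equal_analyze_face_section : Prop := ∀ (face_tokens : List Int) (bbox_tokens_per_element : Int) (se_tokens_per_element : Int) (face_index_offset : Int) (bbox_token_offset : Int) (se_token_offset : Int) (se_codebook_size : Int) (bbox_index_size : Int), Dom_analyze_face_section face_tokens bbox_tokens_per_element se_tokens_per_element face_index_offset bbox_token_offset se_token_offset se_codebook_size bbox_index_size → Pre_analyze_face_section face_tokens bbox_tokens_per_element se_tokens_per_element face_index_offset bbox_token_offset se_token_offset se_codebook_size bbox_index_size → Spec_analyze_face_section face_tokens bbox_tokens_per_element se_tokens_per_element face_index_offset bbox_token_offset se_token_offset se_codebook_size bbox_index_size (analyze_face_section face_tokens bbox_tokens_per_element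 se_tokens_per_element face_index_offset bbox_token_offset se_token_offset se_codebook_size bbox_index_size)

-- ===== LEMMAS AND PROOFS =====

-- per-position score of B's flat loop, Nat-indexed
def pvScore (xs : List Int) (b s : Nat) (fio bto sto scs bis : Int) (p : Nat) : Int :=
  if p % (b + s + 1) < b then
    if bto ≤ xs.getD p 0 ∧ xs.getD p 0 < bto + bis then 1 else 0
  else if p % (b + s + 1) < b + s then
    if sto ≤ xs.getD p 0 ∧ xs.getD p 0 < sto + scs then 1 else 0
  else
    if xs.getD p 0 = fio + (p / (b + s + 1) : Nat) then 1 else 0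

-- per-block score of A's while-loop body
def pvBlock (xs : List Int) (b s : Nat) (fio bto sto scs bis : Int) (k : Nat) : Int :=
  ((List.range b).map (fun j =>
      if bto ≤ xs.getD (k * (b + s + 1) + j) 0 ∧ xs.getD (k * (b + s + 1) + j) 0 < bto + bis then (1 : Int) else 0)).sum
  + ((List.range s).map (fun j =>
      if sto ≤ xs.getD (k * (b + s + 1) + b + j) 0 ∧ xs.getD (k * (b + s + 1) + b + j) 0 < sto + scs then (1 : Int) else 0)).sum
  + (if xs.getD (k * (b + s + 1) + b + s) 0 = fio + (k : Int) then (1 : Int) else 0)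

-- glue: a count-if foldl is acc + a 0/1 sum
theorem pvFoldlAdd {α : Type} (f : Int → α → Int) (g : α → Int)
    (hf : ∀ a x, f a x = a + g x) : ∀ (l : List α) (acc : Int),
    l.foldl f acc = acc + (l.map g).sum := by
  intro l
  induction l with
  | nil => intro acc; simp
  | cons x t ih => intro acc; simp [hf, ih, add_assoc]

theorem afsBbox_eq (xs : List Int) (bto bis : Int) (i0 b : Nat) (acc : Int) :
    afsBbox xs bto bis (i0 : Int) (b : Int) acc
      = acc + ((List.range b).map (fun j =>
          if bto ≤ xs.getD (i0 + j) 0 ∧ xs.getD (i0 + j) 0 < bto + bis then (1 : Int) else 0)).sum := by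
  unfold afsBbox
  rw [PySem.List.pyRange_zero_nat, List.foldl_map]
  rw [pvFoldlAdd _ (fun j : Nat => if bto ≤ xs.getD (i0 + j) 0 ∧ xs.getD (i0 + j) 0 < bto + bis then (1 : Int) else 0)]
  intro a j
  have : (i0 : Int) + (j : Int) = ((i0 + j : Nat) : Int) := by push_cast; ring
  simp only [this, PySem.List.pyGetD_natCast]
  split <;> simp

theorem afsSe_eq (xs : List Int) (sto scs : Int) (i0 b s : Nat) (acc : Int) :
    afsSe xs sto scs (i0 : Int) (b : Int) (s : Int) acc
      = acc + ((List.range s).map (fun j =>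
          if sto ≤ xs.getD (i0 + b + j) 0 ∧ xs.getD (i0 + b + j) 0 < sto + scs then (1 : Int) else 0)).sum := by
  unfold afsSe
  rw [PySem.List.pyRange_zero_nat, List.foldl_map]
  rw [pvFoldlAdd _ (fun j : Nat => if sto ≤ xs.getD (i0 + b + j) 0 ∧ xs.getD (i0 + b + j) 0 < sto + scs then (1 : Int) else 0)]
  intro a j
  have : (i0 : Int) + (b : Int) + (j : Int) = ((i0 + b + j : Nat) : Int) := by push_cast; ring
  simp only [this, PySem.List.pyGetD_natCast]
  split <;> simp

-- A's loop from block k with the correct expected index computes the tail block sum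
theorem afsLoop_eq (xs : List Int) (b s : Nat) (fio bto sto scs bis : Int) :
    ∀ (fuel k : Nat) (acc : Int),
      xs.length / (b + s + 1) - k < fuel →
      afsLoop xs (b : Int) (s : Int) fio bto sto scs bis ((b : Int) + (s : Int) + 1) fuel
          ((k * (b + s + 1) : Nat) : Int) (fio + (k : Int)) acc
        = acc + ((List.range (xs.length / (b + s + 1) - k)).map
            (fun j => pvBlock xs b s fio bto sto scs bis (k + j))).sum := by
  intro fuel
  induction fuel with
  | zero => intro k acc h; omega
  | succ fuel ih =>
    intro k acc h
    by_cases hk : k < xs.length / (b + s + 1)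
    · -- complete block available: k*(b+s+1) + (b+s+1) ≤ len
      have hle : (k + 1) * (b + s + 1) ≤ xs.length := by
        have := (Nat.le_div_iff_mul_le (by omega : 0 < b + s + 1)).mp (by omega : k + 1 ≤ xs.length / (b + s + 1))
        omega
      have hi : ((k * (b + s + 1) : Nat) : Int) < (xs.length : Int) := by
        push_cast; push_cast at hle; nlinarith
      have hbr : ¬ ((xs.length : Int) < ((k * (b + s + 1) : Nat) : Int) + ((b : Int) + (s : Int) + 1)) := by
        push_cast; push_cast at hle; nlinarith
      have hfip : ((k * (b + s + 1) : Nat) : Int) + (b : Int) + (s : Int) < (xs.length : Int) := by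
        push_cast; push_cast at hle; nlinarith
      rw [afsLoop]
      rw [if_pos hi, if_neg hbr]
      simp only []
      rw [if_pos hfip]
      rw [afsBbox_eq, afsSe_eq]
      have hcast1 : ((k * (b + s + 1) : Nat) : Int) + (b : Int) + (s : Int)
          = ((k * (b + s + 1) + b + s : Nat) : Int) := by push_cast; ring
      have hcast2 : ((k * (b + s + 1) : Nat) : Int) + ((b : Int) + (s : Int) + 1)
          = (((k + 1) * (b + s + 1) : Nat) : Int) := by push_cast; ring
      have hcast3 : fio + (k : Int) + 1 = fio + ((k + 1 : Nat) : Int) := by push_cast; ring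
      rw [hcast1, hcast2, hcast3, PySem.List.pyGetD_natCast]
      rw [ih (k + 1) _ (by omega)]
      -- regroup: tail k = pvBlock k + tail (k+1)
      have hnk : xs.length / (b + s + 1) - k = (xs.length / (b + s + 1) - (k + 1)) + 1 := by omega
      rw [hnk, List.range_succ_eq_map]
      simp only [List.map_cons, List.map_map, List.sum_cons]
      have hmc : ((List.range (xs.length / (b + s + 1) - (k + 1))).map
            ((fun j => pvBlock xs b s fio bto sto scs bis (k + j)) ∘ Nat.succ))
          = (List.range (xs.length / (b + s + 1) - (k + 1))).map
            (fun j => pvBlock xs b s fio bto sto scs bis (k + 1 + j)) := by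
        apply List.map_congr_left
        intro j _
        simp only [Function.comp]
        congr 1
        omega
      rw [hmc]
      unfold pvBlock
      simp only [Nat.add_zero]
      split <;> ring
    · -- no complete block left: the loop returns acc immediately
      have hlt : xs.length < (k + 1) * (b + s + 1) := by
        have := (Nat.div_lt_iff_lt_mul (by omega : 0 < b + s + 1)).mp (by omega : xs.length / (b + s + 1) < k + 1)
        omega
      have hz : xs.length / (b + s + 1) - k = 0 := by omega
      rw [afsLoop, hz]
      simp only [List.range_zero, List.map_nil, List.sum_nil, add_zero]
      by_cases hi : ((k * (b + s + 1) : Nat) : Int) < (xs.length : Int)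
      · rw [if_pos hi]
        have : ((xs.length : Int) < ((k * (b + s + 1) : Nat) : Int) + ((b : Int) + (s : Int) + 1)) := by
          push_cast; push_cast at hlt; nlinarith
        rw [if_pos this]
      · rw [if_neg hi]

-- B's flat loop computes the flat position-score sum over the complete blocks
theorem alt_eq (xs : List Int) (b s : Nat) (fio bto sto scs bis : Int) :
    analyze_face_section_alt xs (b : Int) (s : Int) fio bto sto scs bis
      = (((List.range (xs.length / (b + s + 1) * (b + s + 1))).map
          (pvScore xs b s fio bto sto scs bis)).sum, (xs.length : Int)) := by
  unfold analyze_face_section_alt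
  simp only []
  have h1 : (b : Int) + (s : Int) + 1 = ((b + s + 1 : Nat) : Int) := by push_cast; ring
  rw [h1]
  rw [show PySem.Int.floordiv ((xs.length : Nat) : Int) ((b + s + 1 : Nat) : Int)
        = ((xs.length / (b + s + 1) : Nat) : Int) from PySem.Int.floordiv_natCast _ _]
  rw [show ((xs.length / (b + s + 1) : Nat) : Int) * ((b + s + 1 : Nat) : Int)
        = ((xs.length / (b + s + 1) * (b + s + 1) : Nat) : Int) by push_cast; ring]
  rw [PySem.List.pyRange_zero_nat, List.foldl_map]
  rw [pvFoldlAdd _ (pvScore xs b s fio bto sto scs bis)]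
  · simp
  · intro a p
    simp only [PySem.Int.floordiv_natCast, PySem.Int.mod_natCast, PySem.List.pyGetD_natCast,
      pvScore]
    rw [show ((b : Int) + (s : Int)) = ((b + s : Nat) : Int) by push_cast; ring]
    simp only [Nat.cast_lt]
    split
    · split <;> simp
    · split
      · split <;> simp
      · split <;> simp

-- one chunk of the flat sum is one block score
theorem chunk_eq (xs : List Int) (b s : Nat) (fio bto sto scs bis : Int) (m : Nat) :
    ((List.range (b + s + 1)).map
        (fun j => pvScore xs b s fio bto sto scs bis (m * (b + s + 1) + j))).sum
      = pvBlock xs b s fio bto sto scs bis m := by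
  have hsplit : List.range (b + s + 1)
      = List.range b ++ ((List.range s).map (b + ·) ++ [b + s]) := by
    rw [show b + s + 1 = b + (s + 1) from by omega, List.range_add, List.range_succ,
      List.map_append]
    simp
  rw [hsplit, List.map_append, List.map_append, List.sum_append, List.sum_append, List.map_map]
  simp only [Function.comp_def]
  have h1 : (List.range b).map (fun j => pvScore xs b s fio bto sto scs bis (m * (b + s + 1) + j))
      = (List.range b).map (fun j =>
          if bto ≤ xs.getD (m * (b + s + 1) + j) 0 ∧ xs.getD (m * (b + s + 1) + j) 0 < bto + bis then (1 : Int) else 0) := by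
    apply List.map_congr_left
    intro j hj
    have hjb : j < b := List.mem_range.mp hj
    unfold pvScore
    have hm : (m * (b + s + 1) + j) % (b + s + 1) = j := by
      rw [Nat.add_comm, Nat.add_mul_mod_self_right]; exact Nat.mod_eq_of_lt (by omega)
    rw [hm, if_pos hjb]
  have h2 : (List.range s).map (fun t => pvScore xs b s fio bto sto scs bis (m * (b + s + 1) + (b + t)))
      = (List.range s).map (fun t =>
          if sto ≤ xs.getD (m * (b + s + 1) + b + t) 0 ∧ xs.getD (m * (b + s + 1) + b + t) 0 < sto + scs then (1 : Int) else 0) := by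
    apply List.map_congr_left
    intro t ht
    have hts : t < s := List.mem_range.mp ht
    unfold pvScore
    have hm : (m * (b + s + 1) + (b + t)) % (b + s + 1) = b + t := by
      rw [Nat.add_comm, Nat.add_mul_mod_self_right]; exact Nat.mod_eq_of_lt (by omega)
    have hidx : m * (b + s + 1) + (b + t) = m * (b + s + 1) + b + t := by omega
    rw [hm, if_neg (by omega), if_pos (by omega), hidx]
  have h3 : pvScore xs b s fio bto sto scs bis (m * (b + s + 1) + (b + s))
      = (if xs.getD (m * (b + s + 1) + b + s) 0 = fio + (m : Int) then (1 : Int) else 0) := by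
    unfold pvScore
    have hm : (m * (b + s + 1) + (b + s)) % (b + s + 1) = b + s := by
      rw [Nat.add_comm, Nat.add_mul_mod_self_right]; exact Nat.mod_eq_of_lt (by omega)
    have hd : (m * (b + s + 1) + (b + s)) / (b + s + 1) = m := by
      rw [Nat.add_comm, Nat.add_mul_div_right _ _ (by omega : 0 < b + s + 1)]
      simp [Nat.div_eq_of_lt (by omega : b + s < b + s + 1)]
    have hidx : m * (b + s + 1) + (b + s) = m * (b + s + 1) + b + s := by omega
    rw [hm, if_neg (by omega), if_neg (by omega), hd, hidx]
  rw [h1, h2]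
  simp only [List.map_cons, List.map_nil, List.sum_cons, List.sum_nil, add_zero, h3]
  unfold pvBlock
  ring

-- grouping: the flat sum over m complete blocks is the sum of block scores
theorem group_eq (xs : List Int) (b s : Nat) (fio bto sto scs bis : Int) :
    ∀ m : Nat,
      ((List.range (m * (b + s + 1))).map (pvScore xs b s fio bto sto scs bis)).sum
        = ((List.range m).map (pvBlock xs b s fio bto sto scs bis)).sum := by
  intro m
  induction m with
  | zero => simp
  | succ m ih =>
    rw [show (m + 1) * (b + s + 1) = m * (b + s + 1) + (b + s + 1) from by ring,
      List.range_add, List.map_append, List.sum_append, ih, List.map_map]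
    simp only [Function.comp_def]
    rw [chunk_eq, List.range_succ, List.map_append, List.sum_append]
    simp

-- A's top-level function equals the block-sum pair
theorem a_eq (xs : List Int) (b s : Nat) (fio bto sto scs bis : Int) :
    analyze_face_section xs (b : Int) (s : Int) fio bto sto scs bis
      = (((List.range (xs.length / (b + s + 1))).map (pvBlock xs b s fio bto sto scs bis)).sum,
         (xs.length : Int)) := by
  unfold analyze_face_section
  by_cases h0 : xs.length = 0
  · simp [h0, Nat.zero_div]
  · rw [if_neg h0]
    simp only []
    have h := afsLoop_eq xs b s fio bto sto scs bis (xs.length + 1) 0 0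
      (by have := Nat.div_le_self xs.length (b + s + 1); omega)
    simp only [Nat.zero_mul, Nat.cast_zero, add_zero, Nat.sub_zero, zero_add] at h
    rw [h]

-- ===== VERDICT (by name: the statement is the Claim_ definition above) =====
theorem analyze_face_section_spec : Claim_equal_analyze_face_section := by
  intro xs bbox se fio bto sto scs bis _hdom hpre
  unfold Spec_analyze_face_section
  obtain ⟨h1, h2⟩ := hpre
  have hb : bbox = ((bbox.toNat : Nat) : Int) := (Int.toNat_of_nonneg h1).symm
  have hs : se = ((se.toNat : Nat) : Int) := (Int.toNat_of_nonneg h2).symm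
  rw [hb, hs, a_eq, alt_eq, ← group_eq]
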